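-- pv_equiv track=rewrite | github.com/njcuk9999/apero-drs | INTROOT2/terrapipe/plotting/latex.py | apply_colormask
-- ===== SOURCE A (Python) =====
-- GOOD_COLOUR = '67FD9A'
--
-- BAD_COLOUR = 'FD6864'
--
-- ROW_END_TEX = '\\\\\n'
--
-- def cmd(command, inputs=None, options=None):
--     # set up keywords
--     kwargs = dict(command=command, input=inputs, options=options)
--     # add command name
--     command = r'\{command}'.format(**kwargs)
--     # add options
--     if options is not None:
--         command += r'[{options}]'.format(**kwargs)
--     # add input
--     if inputs is not None:
--         command += r'{{{input}}}'.format(**kwargs)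
--     # return
--     return command
--
-- def apply_colormask(lines, colormask, table):
--     if colormask is not None:
--         # get good latex cmd
--         goodcmd = cmd('rowcolor', GOOD_COLOUR, 'HTML') + ' '
--         # get bad latex cmd
--         badcmd = cmd('rowcolor', BAD_COLOUR, 'HTML') + ' '
--         # make sure colormask is the same length as table
--         if len(colormask) == len(table):
--             # set the initial line number
--             row = 1
--             # set new lines storage
--             newlines = []
--             # loop around old lines (in reverse to avoid units/column names)
--             for line in lines[::-1]:
--                 # if we have a line we need to edit it
--                 if line.endswith(ROW_END_TEX):
--                     # skip the header
--                     if row > len(colormask):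
--                         newlines.append(line)
--                         continue
--                     # if true line is good
--                     if colormask[-row]:
--                         newline = goodcmd + line
--                     # else line is bad
--                     else:
--                         newline = badcmd + line
--                     # append to storage
--                     newlines.append(newline)
--                     row += 1
--                 # else do not touch the line
--                 else:
--                     newlines.append(line)
--             # reverse lines
--             newlines = newlines[::-1]
--
--         # if colormask is not correct length do nothing
--         else:
--             newlines = list(lines)
--     # if colormask is not set do nothing
--     else:
--         newlines = list(lines)
--     # return new lines
--     return newlines
-- ===== SOURCE B (Python) =====
-- ROW_END_TEX = '\\\\\n'
-- GOOD_CMD = '\\rowcolor[HTML]{67FD9A} '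
-- BAD_CMD = '\\rowcolor[HTML]{FD6864} '
--
-- def apply_colormask(lines, colormask, table):
--     # single forward pass: the last len(colormask) row-end lines get a color prefix
--     if colormask is None or len(colormask) != len(table):
--         return list(lines)
--     offset = sum(line.endswith(ROW_END_TEX) for line in lines) - len(colormask)
--     out = []
--     p = 0
--     for line in lines:
--         if line.endswith(ROW_END_TEX):
--             if p >= offset:
--                 line = (GOOD_CMD if colormask[p - offset] else BAD_CMD) + line
--             p += 1
--         out.append(line)
--     return out
-- ===== Notes on version B (the rewrite author's own statement) =====
-- stated objective: simpler
-- what changed: Replaces A's reverse traversal (reversing lines, counting rows from the end with negative colormask indexing, then reversing the result again) by a single forward pass that precomputes the number of row-end lines and an offset, colouring the last len(colormask) row-end lines directly.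
import Mathlib
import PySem

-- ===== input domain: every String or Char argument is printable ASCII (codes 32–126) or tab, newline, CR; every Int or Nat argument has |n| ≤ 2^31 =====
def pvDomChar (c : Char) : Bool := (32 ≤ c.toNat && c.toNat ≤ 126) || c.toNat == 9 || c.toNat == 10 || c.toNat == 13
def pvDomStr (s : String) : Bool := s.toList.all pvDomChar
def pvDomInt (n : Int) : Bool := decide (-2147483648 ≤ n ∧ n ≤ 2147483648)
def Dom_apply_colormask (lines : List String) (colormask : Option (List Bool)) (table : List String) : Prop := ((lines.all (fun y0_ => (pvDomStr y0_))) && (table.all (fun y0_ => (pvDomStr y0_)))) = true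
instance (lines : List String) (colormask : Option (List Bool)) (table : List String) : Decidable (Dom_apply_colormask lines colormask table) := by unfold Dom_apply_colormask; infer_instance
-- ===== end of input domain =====

-- B replaces A's reverse pass (double reversal + negative colormask indexing) by ONE forward
-- pass with a precomputed offset; same return value, objective: simpler decomposition.

-- ===== PORT A =====
def GOOD_COLOUR : String := "67FD9A"
def BAD_COLOUR : String := "FD6864"
def ROW_END_TEX : String := "\\\\\n"

def cmd (command : String) (inputs : Option String) (options : Option String) : String :=
  let c1 := "\\" ++ command
  let c2 := match options with
    | some o => c1 ++ "[" ++ o ++ "]"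
    | none => c1
  match inputs with
  | some i => c2 ++ "{" ++ i ++ "}"
  | none => c2

-- the 'for line in lines[::-1]' loop of A, state = (row, lines already appended);
-- colormask[-row] is in range whenever the branch runs (1 ≤ row ≤ len), so getD false is never used
def aLoop (cm : List Bool) (good bad : String) : Nat → List String → List String
  | _, [] => []
  | row, line :: rest =>
    if PySem.Str.endswith line ROW_END_TEX then
      if row > cm.length then line :: aLoop cm good bad row rest
      else
        ((if (PySem.List.pyGet? cm (-(row : Int))).getD false then good else bad) ++ line)
          :: aLoop cm good bad (row + 1) rest
    else line :: aLoop cm good bad row rest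

def apply_colormask (lines : List String) (colormask : Option (List Bool)) (table : List String) : List String :=
  match colormask with
  | some cm =>
    let goodcmd := cmd "rowcolor" (some GOOD_COLOUR) (some "HTML") ++ " "
    let badcmd := cmd "rowcolor" (some BAD_COLOUR) (some "HTML") ++ " "
    if cm.length = table.length then (aLoop cm goodcmd badcmd 1 lines.reverse).reverse
    else lines
  | none => lines

-- ===== PORT B =====
def GOOD_CMD : String := "\\rowcolor[HTML]{67FD9A} "
def BAD_CMD : String := "\\rowcolor[HTML]{FD6864} "

-- the single forward loop of B, p = number of row-end lines already seen;
-- colormask[p - offset] is in range whenever the branch runs, so getD false is never used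
def bLoop (cm : List Bool) (good bad : String) (offset : Int) : Nat → List String → List String
  | _, [] => []
  | p, line :: rest =>
    if PySem.Str.endswith line ROW_END_TEX then
      (if (p : Int) ≥ offset then
        (if (PySem.List.pyGet? cm ((p : Int) - offset)).getD false then good else bad) ++ line
       else line) :: bLoop cm good bad offset (p + 1) rest
    else line :: bLoop cm good bad offset p rest

def apply_colormask_alt (lines : List String) (colormask : Option (List Bool)) (table : List String) : List String :=
  match colormask with
  | some cm =>
    if cm.length = table.length then
      bLoop cm GOOD_CMD BAD_CMD
        ((lines.countP (fun l => PySem.Str.endswith l ROW_END_TEX) : Int) - cm.length) 0 lines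
    else lines
  | none => lines

-- ===== PRECONDITION & SPEC =====
def Spec_apply_colormask (lines : List String) (colormask : Option (List Bool)) (table : List String) (out : List String) : Prop := out = apply_colormask_alt lines colormask table
instance (lines : List String) (colormask : Option (List Bool)) (table : List String) (out : List String) : Decidable (Spec_apply_colormask lines colormask table out) := by unfold Spec_apply_colormask; infer_instance

-- ===== CLAIM (what is proved, stated in full; the proofs are below) =====
def Claim_equal_apply_colormask : Prop := ∀ (lines : List String) (colormask : Option (List Bool)) (table : List String), Dom_apply_colormask lines colormask table → Spec_apply_colormask lines colormask table (apply_colormask lines colormask table)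

-- ===== LEMMAS AND PROOFS =====

-- bLoop distributes over append, counting the row-end lines of the first part
theorem bLoop_append (cm : List Bool) (good bad : String) (off : Int) (zs : List String) :
    ∀ (ys : List String) (p : Nat),
      bLoop cm good bad off p (ys ++ zs)
        = bLoop cm good bad off p ys
            ++ bLoop cm good bad off (p + ys.countP (fun l => PySem.Str.endswith l ROW_END_TEX)) zs := by
  intro ys
  induction ys with
  | nil => intro p; simp [bLoop]
  | cons y ys ih =>
    intro p
    by_cases hy : PySem.Str.endswith y ROW_END_TEX = true
    · have hy' : PySem.Chars.endswith y.toList ROW_END_TEX.toList = true := by simpa using hy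
      simp [bLoop, hy', ih, Nat.add_assoc, Nat.add_comm 1]
    · have hy' : PySem.Chars.endswith y.toList ROW_END_TEX.toList = false := by simpa using hy
      simp [bLoop, hy', ih]

-- if the offset is beyond every row-end position, bLoop touches nothing
theorem bLoop_untouched (cm : List Bool) (good bad : String) (off : Int) :
    ∀ (ys : List String) (p : Nat),
      ((p : Int) + ys.countP (fun l => PySem.Str.endswith l ROW_END_TEX) ≤ off) →
      bLoop cm good bad off p ys = ys := by
  intro ys
  induction ys with
  | nil => intro p _; simp [bLoop]
  | cons y ys ih =>
    intro p hp
    rw [List.countP_cons] at hp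
    by_cases hy : PySem.Str.endswith y ROW_END_TEX = true
    · have hy' : PySem.Chars.endswith y.toList ROW_END_TEX.toList = true := by simpa using hy
      simp only [hy, if_pos] at hp
      have hlt : ¬ (off ≤ (p : Int)) := by
        have : (0:Int) ≤ (ys.countP (fun l => PySem.Str.endswith l ROW_END_TEX) : Int) := by positivity
        push_cast at hp ⊢; omega
      simp [bLoop, hy', hlt, ih (p + 1) (by push_cast at hp ⊢; omega)]
    · have hy' : PySem.Chars.endswith y.toList ROW_END_TEX.toList = false := by simpa using hy
      simp only [hy] at hp
      simp [bLoop, hy', ih p (by push_cast at hp ⊢; omega)]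

-- evaluation of bLoop on a single line
theorem bLoop_single (cm : List Bool) (good bad : String) (off : Int) (p : Nat) (y : String) :
    bLoop cm good bad off p [y]
      = [if PySem.Str.endswith y ROW_END_TEX = true then
          (if (p : Int) ≥ off then
            (if (PySem.List.pyGet? cm ((p : Int) - off)).getD false then good else bad) ++ y
          else y)
        else y] := by
  by_cases hy : PySem.Str.endswith y ROW_END_TEX = true
  · have hy' : PySem.Chars.endswith y.toList ROW_END_TEX.toList = true := by simpa using hy
    simp [bLoop, hy']
  · have hy' : PySem.Chars.endswith y.toList ROW_END_TEX.toList = false := by simpa using hy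
    simp [bLoop, hy']

-- the reverse pass of A, forward again, IS the forward pass of B
theorem rev_eq (cm : List Bool) (good bad : String) :
    ∀ (l : List String) (r : Nat), 1 ≤ r →
      (aLoop cm good bad r l.reverse).reverse
        = bLoop cm good bad
            ((l.countP (fun s => PySem.Str.endswith s ROW_END_TEX) : Int) + r - cm.length - 1) 0 l := by
  intro l
  induction l using List.reverseRecOn with
  | nil => intro r _; simp [aLoop, bLoop]
  | append_singleton ys y ih =>
    intro r hr
    rw [List.reverse_append, List.reverse_singleton, List.singleton_append,
        List.countP_append, List.countP_singleton,
        bLoop_append, bLoop_single]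
    by_cases hy : PySem.Str.endswith y ROW_END_TEX = true
    · rw [if_pos hy, if_pos hy]
      by_cases hrc : r > cm.length
      · -- row > len(colormask): everything stays untouched on both sides
        rw [aLoop, if_pos hy, if_pos hrc, List.reverse_cons, ih r hr]
        have e1 : bLoop cm good bad
            ((ys.countP (fun s => PySem.Str.endswith s ROW_END_TEX) : Int) + r - cm.length - 1) 0 ys = ys :=
          bLoop_untouched _ _ _ _ ys 0 (by push_cast; omega)
        have e2 : bLoop cm good bad
            (((ys.countP (fun s => PySem.Str.endswith s ROW_END_TEX) + 1 : Nat) : Int) + r - cm.length - 1) 0 ys = ys :=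
          bLoop_untouched _ _ _ _ ys 0 (by push_cast; omega)
        have hge : ¬ (((0 + ys.countP (fun s => PySem.Str.endswith s ROW_END_TEX) : Nat) : Int)
            ≥ ((ys.countP (fun s => PySem.Str.endswith s ROW_END_TEX) + 1 : Nat) : Int) + r - cm.length - 1) := by
          push_cast; omega
        rw [e1, e2, if_neg hge]
      · -- row ≤ len(colormask): the head line is coloured identically
        have hrc' : r ≤ cm.length := by omega
        rw [aLoop, if_pos hy, if_neg hrc, List.reverse_cons, ih (r + 1) (by omega)]
        have hge : (((0 + ys.countP (fun s => PySem.Str.endswith s ROW_END_TEX) : Nat) : Int)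
            ≥ ((ys.countP (fun s => PySem.Str.endswith s ROW_END_TEX) + 1 : Nat) : Int) + r - cm.length - 1) := by
          push_cast; omega
        rw [if_pos hge]
        have hoff : ((ys.countP (fun s => PySem.Str.endswith s ROW_END_TEX) : Int) + (r + 1 : Nat) - cm.length - 1)
            = (((ys.countP (fun s => PySem.Str.endswith s ROW_END_TEX) + 1 : Nat) : Int) + r - cm.length - 1) := by
          push_cast; ring
        rw [hoff]
        congr 2
        have hidx : (((0 + ys.countP (fun s => PySem.Str.endswith s ROW_END_TEX) : Nat) : Int)
            - ((((ys.countP (fun s => PySem.Str.endswith s ROW_END_TEX) + 1 : Nat) : Int)) + r - cm.length - 1))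
            = (cm.length : Int) - r := by push_cast; ring
        rw [hidx]
        have hneg : PySem.List.pyGet? cm (-(r : Int)) = cm[cm.length - r]? :=
          PySem.List.pyGet?_neg_natCast cm r (by omega) hrc'
        have hpos : PySem.List.pyGet? cm ((cm.length : Int) - r) = cm[cm.length - r]? := by
          rw [show ((cm.length : Int) - r) = ((cm.length - r : Nat) : Int) by omega,
              PySem.List.pyGet?_natCast]
        rw [hneg, ← hpos]
    · simp only [if_neg hy]
      rw [aLoop, if_neg hy, List.reverse_cons, ih r hr]
      simp

theorem good_eq : cmd "rowcolor" (some GOOD_COLOUR) (some "HTML") ++ " " = GOOD_CMD := by decide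
theorem bad_eq : cmd "rowcolor" (some BAD_COLOUR) (some "HTML") ++ " " = BAD_CMD := by decide

-- ===== VERDICT (by name: the statement is the Claim_ definition above) =====
theorem apply_colormask_spec : Claim_equal_apply_colormask := by
  intro lines colormask table _
  unfold Spec_apply_colormask apply_colormask apply_colormask_alt
  cases colormask with
  | none => rfl
  | some cm =>
    simp only [good_eq, bad_eq]
    by_cases hlen : cm.length = table.length
    · rw [if_pos hlen, if_pos hlen,
          rev_eq cm GOOD_CMD BAD_CMD lines 1 (le_refl 1)]
      congr 1
      push_cast; ring
    · rw [if_neg hlen, if_neg hlen]
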